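-- pv_equiv track=rewrite | github.com/devonjhills/etsy-digital-mockup-tools | zip.py | split_files_into_groups
-- ===== SOURCE A (Python) =====
-- def split_files_into_groups(file_list, num_groups):
--     """Splits a list of files into roughly equal groups."""
--     if num_groups <= 0:
--         return []
--     total_files = len(file_list)
--     if total_files == 0:
--         return []
--     if num_groups >= total_files:  # Handle case where we need more groups than files
--         return [[f] for f in file_list]  # Each file becomes its own group
--
--     base_size = total_files // num_groups
--     remainder = total_files % num_groups
--     groups = []
--     start_index = 0
--     for i in range(num_groups):
--         end_index = start_index + base_size + (1 if i < remainder else 0)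
--         groups.append(file_list[start_index:end_index])
--         start_index = end_index
--     return groups
-- ===== SOURCE B (Python) =====
-- def split_files_into_groups(file_list, num_groups):
--     """Splits a list of files into roughly equal groups."""
--     if num_groups <= 0:
--         return []
--     n = len(file_list)
--     if n == 0:
--         return []
--     k = min(num_groups, n)
--     base, rem = divmod(n, k)
--     groups = []
--     cur = []
--     prev = 0
--     for j, f in enumerate(file_list):
--         g = max(j // (base + 1), (j - rem) // base)
--         if g != prev:
--             groups.append(cur)
--             cur = []
--             prev = g
--         cur.append(f)
--     groups.append(cur)
--     return groups
-- ===== Notes on version B (the rewrite author's own statement) =====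
-- stated objective: alternative
-- what changed: Replaces A's per-group slicing with base/remainder running boundaries by a single element-driven pass: each element's group index is a closed form of its position, max(j//(base+1),(j-rem)//base), and a new group is started whenever that index changes; the more-groups-than-files guard disappears by clamping the group count to min(num_groups, n).
import Mathlib
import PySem

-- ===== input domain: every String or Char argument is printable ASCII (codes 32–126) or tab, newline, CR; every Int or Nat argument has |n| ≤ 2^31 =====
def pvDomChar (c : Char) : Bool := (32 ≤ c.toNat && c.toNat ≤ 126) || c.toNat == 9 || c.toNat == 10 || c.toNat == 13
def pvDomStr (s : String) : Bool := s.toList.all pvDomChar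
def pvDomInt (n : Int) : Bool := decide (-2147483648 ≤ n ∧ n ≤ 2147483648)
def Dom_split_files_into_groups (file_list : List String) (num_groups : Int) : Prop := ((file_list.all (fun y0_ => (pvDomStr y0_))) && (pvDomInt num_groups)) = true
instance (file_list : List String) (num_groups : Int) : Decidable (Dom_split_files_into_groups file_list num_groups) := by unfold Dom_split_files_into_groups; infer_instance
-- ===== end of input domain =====

-- B replaces A's per-group slicing (base/remainder running boundaries) with one element-driven
-- pass that computes each element's group index by a closed form and starts a new group when it
-- changes (objective: alternative; same cost).


-- ===== PORT A =====
def split_files_into_groups (file_list : List String) (num_groups : Int) : List (List String) :=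
  if num_groups ≤ 0 then []
  else
    let total_files : Int := file_list.length
    if total_files = 0 then []
    else if num_groups ≥ total_files then file_list.map (fun f => [f])
    else
      let base_size := PySem.Int.floordiv total_files num_groups
      let remainder := PySem.Int.mod total_files num_groups
      ((PySem.List.pyRange 0 num_groups 1).foldl
        (fun (acc : List (List String) × Int) i =>
          let end_index := acc.2 + base_size + (if i < remainder then (1:Int) else 0)
          (acc.1 ++ [PySem.List.slice file_list (some acc.2) (some end_index)], end_index))
        ([], 0)).1

-- ===== PORT B =====
-- the for-loop of Source B over enumerate(file_list), state (groups, cur, prev); j is the running index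
def pvBLoopB (base rem : Int) : List String → Int → List (List String) → List String → Int → List (List String)
  | [], _, groups, cur, _ => groups ++ [cur]
  | f :: rest, j, groups, cur, prev =>
    if (max (PySem.Int.floordiv j (base + 1)) (PySem.Int.floordiv (j - rem) base)) ≠ prev then
      pvBLoopB base rem rest (j + 1) (groups ++ [cur]) [f]
        (max (PySem.Int.floordiv j (base + 1)) (PySem.Int.floordiv (j - rem) base))
    else
      pvBLoopB base rem rest (j + 1) groups (cur ++ [f]) prev

def split_files_into_groups_alt (file_list : List String) (num_groups : Int) : List (List String) :=
  if num_groups ≤ 0 then []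
  else if (file_list.length : Int) = 0 then []
  else
    pvBLoopB (PySem.Int.floordiv (file_list.length : Int) (min num_groups (file_list.length : Int)))
             (PySem.Int.mod (file_list.length : Int) (min num_groups (file_list.length : Int)))
             file_list 0 [] [] 0

-- ===== PRECONDITION & SPEC =====
def Spec_split_files_into_groups (file_list : List String) (num_groups : Int) (out : List (List String)) : Prop := out = split_files_into_groups_alt file_list num_groups
instance (file_list : List String) (num_groups : Int) (out : List (List String)) : Decidable (Spec_split_files_into_groups file_list num_groups out) := by unfold Spec_split_files_into_groups; infer_instance

-- ===== CLAIM (what is proved, stated in full; the proofs are below) =====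
def Claim_equal_split_files_into_groups : Prop := ∀ (file_list : List String) (num_groups : Int), Dom_split_files_into_groups file_list num_groups → Spec_split_files_into_groups file_list num_groups (split_files_into_groups file_list num_groups)

-- ===== LEMMAS AND PROOFS =====

-- chop a list into consecutive chunks of the given sizes
def pvChop : List Nat → List String → List (List String)
  | [], _ => []
  | s :: ss, l => l.take s :: pvChop ss (l.drop s)

-- size of group i (extras at the front), and the start boundary of group i
def pvSzf (base rem i : Nat) : Nat := base + if i < rem then 1 else 0
def pvBN (base rem i : Nat) : Nat := i * base + min i rem

theorem pvBN_succ (base rem t : Nat) : pvBN base rem (t + 1) = pvBN base rem t + pvSzf base rem t := by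
  simp only [pvBN, pvSzf, Nat.succ_mul]
  split_ifs <;> omega

theorem pvBN_mono (base rem : Nat) (hb : 1 ≤ base) : StrictMono (pvBN base rem) := by
  apply strictMono_nat_of_lt_succ
  intro t
  rw [pvBN_succ]
  simp only [pvSzf]
  omega

-- the closed-form group index of element j is i, for j inside group i's range
theorem pvGval (base rem i j : Nat) (hb : 1 ≤ base)
    (h1 : pvBN base rem i ≤ j) (h2 : j < pvBN base rem (i + 1)) :
    max (PySem.Int.floordiv (j : Int) ((base : Int) + 1)) (PySem.Int.floordiv ((j : Int) - (rem : Int)) (base : Int)) = (i : Int) := by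
  have hb' : (0 : Int) < (base : Int) := by exact_mod_cast hb
  have hb1 : (0 : Int) < (base : Int) + 1 := by omega
  have hmul : ∀ a b : Nat, ((a * b : Nat) : Int) = (a : Int) * (b : Int) := by intro a b; push_cast; ring
  by_cases hi : i < rem
  · -- group i starts at i*(base+1)
    have e1 : pvBN base rem i = i * (base + 1) := by
      have hmin : min i rem = i := by omega
      simp only [pvBN, hmin]
      ring
    have e2 : pvBN base rem (i + 1) = (i + 1) * (base + 1) := by
      have hmin : min (i + 1) rem = i + 1 := by omega
      simp only [pvBN, hmin]
      ring
    have d1 : PySem.Int.floordiv (j : Int) ((base : Int) + 1) = (i : Int) := by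
      rw [PySem.Int.floordiv_eq_iff_of_pos hb1]
      constructor
      · have := h1; rw [e1] at this
        have hc : ((i * (base + 1) : Nat) : Int) ≤ (j : Int) := by exact_mod_cast this
        rw [hmul] at hc; push_cast at hc ⊢; linarith
      · have := h2; rw [e2] at this
        have hc : (j : Int) < ((((i + 1) * (base + 1)) : Nat) : Int) := by exact_mod_cast this
        rw [hmul] at hc; push_cast at hc ⊢; linarith
    have d2 : PySem.Int.floordiv ((j : Int) - (rem : Int)) (base : Int) < (i : Int) + 1 := by
      rw [PySem.Int.floordiv_lt_iff_lt_mul hb']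
      have := h2; rw [e2] at this
      have hc : (j : Int) < ((((i + 1) * (base + 1)) : Nat) : Int) := by exact_mod_cast this
      rw [hmul] at hc; push_cast at hc ⊢
      have hir : (i : Int) + 1 ≤ (rem : Int) := by exact_mod_cast hi
      nlinarith
    rw [d1]
    omega
  · -- group i starts at i*base + rem
    have hri : rem ≤ i := by omega
    have e1 : pvBN base rem i = i * base + rem := by simp only [pvBN]; omega
    have e2 : pvBN base rem (i + 1) = (i + 1) * base + rem := by
      simp only [pvBN]
      have : min (i + 1) rem = rem := by omega
      rw [this]
    have d2 : PySem.Int.floordiv ((j : Int) - (rem : Int)) (base : Int) = (i : Int) := by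
      rw [PySem.Int.floordiv_eq_iff_of_pos hb']
      constructor
      · have := h1; rw [e1] at this
        have hc : (((i * base + rem : Nat)) : Int) ≤ (j : Int) := by exact_mod_cast this
        push_cast at hc ⊢; linarith
      · have := h2; rw [e2] at this
        have hc : (j : Int) < (((i + 1) * base + rem : Nat) : Int) := by exact_mod_cast this
        push_cast at hc ⊢; linarith
    have d1 : PySem.Int.floordiv (j : Int) ((base : Int) + 1) < (i : Int) + 1 := by
      rw [PySem.Int.floordiv_lt_iff_lt_mul hb1]
      have := h2; rw [e2] at this
      have hc : (j : Int) < (((i + 1) * base + rem : Nat) : Int) := by exact_mod_cast this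
      push_cast at hc ⊢
      have hir : (rem : Int) ≤ (i : Int) := by exact_mod_cast hri
      nlinarith
    rw [d2]
    omega

theorem pvTakeCons (l : List String) (j t : Nat) (hj : j < l.length) (ht : 1 ≤ t) :
    (l.drop j).take t = l[j] :: (l.drop (j + 1)).take (t - 1) := by
  obtain ⟨t', rfl⟩ : ∃ t', t = t' + 1 := ⟨t - 1, by omega⟩
  rw [List.drop_eq_getElem_cons hj, List.take_succ_cons, Nat.add_sub_cancel]

-- B's loop, entered anywhere inside group i, produces the current group followed by the chop of the rest
theorem pvBLoopB_chunks (l : List String) (base rem kN : Nat) (hb : 1 ≤ base) (hrem : rem < kN)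
    (hn : l.length = base * kN + rem) :
    ∀ (m j i : Nat) (groups : List (List String)) (cur : List String), l.length - j ≤ m →
    i < kN → pvBN base rem i ≤ j → j ≤ pvBN base rem (i + 1) →
    pvBLoopB (base : Int) (rem : Int) (l.drop j) (j : Int) groups cur (i : Int)
      = groups ++ [cur ++ ((l.drop j).take (pvBN base rem (i + 1) - j))]
        ++ pvChop ((List.range' (i + 1) (kN - (i + 1))).map (pvSzf base rem)) (l.drop (pvBN base rem (i + 1))) := by
  have hmono := pvBN_mono base rem hb
  have hend : pvBN base rem kN = l.length := by
    simp only [pvBN]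
    have : min kN rem = rem := by omega
    rw [this, hn]; ring
  intro m
  induction m with
  | zero =>
    intro j i groups cur hm hik h1 h2
    -- j = l.length forces i + 1 = kN and j = pvBN (i+1)
    have hj : l.length ≤ j := by omega
    have hik1 : pvBN base rem (i + 1) ≤ l.length := by
      rw [← hend]; exact (hmono.monotone (by omega : i + 1 ≤ kN))
    have hje : j = pvBN base rem (i + 1) := by omega
    have hik2 : i + 1 = kN := by
      by_contra h
      have : pvBN base rem (i + 1) < pvBN base rem kN := hmono (by omega)
      omega
    subst hje
    rw [List.drop_eq_nil_of_le (by omega)]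
    simp [pvBLoopB, hik2, pvChop]
  | succ m ih =>
    intro j i groups cur hm hik h1 h2
    by_cases hjb : j = pvBN base rem (i + 1)
    · by_cases hlast : i + 1 = kN
      · -- end of list
        have : j = l.length := by rw [hjb, hlast, hend]
        rw [List.drop_eq_nil_of_le (by omega)]
        subst this
        simp [pvBLoopB, hlast, pvChop, hjb]
      · -- boundary: start group i+1
        have hjlt : j < pvBN base rem (i + 1 + 1) := by
          rw [hjb]; exact hmono (by omega)
        have hjn : j < l.length := by
          have : pvBN base rem (i + 1) < pvBN base rem kN := hmono (by omega)
          omega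
        have hG := pvGval base rem (i + 1) j hb (by omega) hjlt
        have hcast : (j : Int) + 1 = ((j + 1 : Nat) : Int) := by push_cast; ring
        rw [List.drop_eq_getElem_cons hjn, pvBLoopB]
        rw [if_pos (by rw [hG]; intro h; exact absurd (by exact_mod_cast h : i + 1 = i) (by omega))]
        rw [hG, hcast]
        have hrec := ih (j + 1) (i + 1) (groups ++ [cur]) [l[j]] (by omega) (by omega)
          (by omega) (by omega)
        rw [hrec]
        have hsz1 : 1 ≤ pvSzf base rem (i + 1) := by simp only [pvSzf]; omega
        have hbn2 : pvBN base rem (i + 1 + 1) = j + pvSzf base rem (i + 1) := by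
          rw [hjb, pvBN_succ]
        have hrange : List.range' (i + 1) (kN - (i + 1)) = (i + 1) :: List.range' (i + 1 + 1) (kN - (i + 1 + 1)) := by
          have h9 : kN - (i + 1) = (kN - (i + 1 + 1)) + 1 := by omega
          rw [h9, List.range'_succ]
        rw [hrange]
        simp only [List.map_cons, pvChop]
        have hnum2 : pvBN base rem (i + 1) + pvSzf base rem (i + 1) = pvBN base rem (i + 1 + 1) := by omega
        have hnum : pvBN base rem (i + 1 + 1) - (j + 1) = pvSzf base rem (i + 1) - 1 := by omega
        have hdrop2 : (l.drop (pvBN base rem (i + 1))).drop (pvSzf base rem (i + 1)) = l.drop (pvBN base rem (i + 1 + 1)) := by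
          rw [List.drop_drop, hnum2]
        have htake2 : (l.drop (pvBN base rem (i + 1))).take (pvSzf base rem (i + 1))
            = l[j] :: (l.drop (j + 1)).take (pvBN base rem (i + 1 + 1) - (j + 1)) := by
          rw [← hjb, hnum, pvTakeCons l j _ hjn hsz1]
        rw [hdrop2, htake2]
        have htk0 : pvBN base rem (i + 1) - j = 0 := by omega
        rw [htk0]
        simp
    · -- inside group i: j < pvBN (i+1)
      have hjlt : j < pvBN base rem (i + 1) := by omega
      have hjn : j < l.length := by
        have : pvBN base rem (i + 1) ≤ pvBN base rem kN := hmono.monotone (by omega)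
        omega
      have hG := pvGval base rem i j hb h1 hjlt
      have hcast : (j : Int) + 1 = ((j + 1 : Nat) : Int) := by push_cast; ring
      rw [List.drop_eq_getElem_cons hjn, pvBLoopB, if_neg (by rw [hG]; simp), hcast]
      have hrec := ih (j + 1) i groups (cur ++ [l[j]]) (by omega) hik (by omega) (by omega)
      rw [hrec]
      have ht : pvBN base rem (i + 1) - j = (pvBN base rem (i + 1) - (j + 1)) + 1 := by omega
      rw [ht, List.take_succ_cons]
      simp

-- replicate-1 sizes chop into singletons
theorem pvChop_ones : ∀ (l : List String), pvChop (List.replicate l.length 1) l = l.map (fun f => [f]) := by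
  intro l
  induction l with
  | nil => simp [pvChop]
  | cons x xs ih => simp [pvChop, List.replicate_succ, ih]

-- A's fold characterised as a chop (indices a..a+m-1, start offset s)
theorem pvFoldA (l : List String) (base : Nat) (remInt : Int) :
    ∀ (m a s : Nat) (p : List (List String)),
    ((PySem.List.pyRange (a : Int) ((a : Int) + (m : Int)) 1).foldl
      (fun (acc : List (List String) × Int) i =>
        (acc.1 ++ [PySem.List.slice l (some acc.2) (some (acc.2 + (base : Int) + (if i < remInt then (1:Int) else 0)))],
          acc.2 + (base : Int) + (if i < remInt then (1:Int) else 0))) (p, (s : Int))).1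
    = p ++ pvChop ((List.range m).map (fun i => base + if ((a + i : Nat) : Int) < remInt then 1 else 0)) (l.drop s) := by
  intro m
  induction m with
  | zero =>
    intro a s p
    rw [PySem.List.pyRange_one_eq_nil (by omega)]
    simp [pvChop]
  | succ m ih =>
    intro a s p
    rw [PySem.List.pyRange_one_cons (by omega : (a : Int) < (a : Int) + ((m + 1 : Nat) : Int)), List.foldl_cons]
    set sz : Nat := base + (if ((a : Nat) : Int) < remInt then 1 else 0) with hsz
    have he : (s : Int) + (base : Int) + (if ((a : Nat) : Int) < remInt then (1:Int) else 0) = ((s + sz : Nat) : Int) := by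
      simp only [hsz]; push_cast; split <;> omega
    have hslice : PySem.List.slice l (some (s : Int)) (some (((s + sz : Nat) : Int))) = (l.drop s).take sz := by
      have h2 : ((s + sz : Nat) : Int) = (s : Int) + (sz : Int) := by push_cast; ring
      rw [h2, PySem.List.slice_natCast_add]
    have harg2 : (a : Int) + ((m + 1 : Nat) : Int) = (((a + 1 : Nat)) : Int) + (m : Int) := by push_cast; ring
    have harg : (a : Int) + 1 = ((a + 1 : Nat) : Int) := by push_cast; ring
    simp only [he, hslice, harg, harg2]
    rw [ih (a + 1) (s + sz) (p ++ [(l.drop s).take sz])]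
    rw [List.range_succ_eq_map]
    simp only [List.map_cons, List.map_map]
    rw [pvChop]
    have h0 : base + (if ((a + 0 : Nat) : Int) < remInt then 1 else 0) = sz := by simp [hsz]
    rw [h0]
    have hdrop : (l.drop s).drop sz = l.drop (s + sz) := by
      rw [List.drop_drop]
    rw [hdrop]
    simp only [List.append_assoc, List.singleton_append]
    congr 2
    congr 1
    apply List.map_congr_left
    intro i _
    simp only [Function.comp, Nat.succ_eq_add_one]
    have h3 : a + 1 + i = a + (i + 1) := by omega
    rw [h3]

-- ===== VERDICT (by name: the statement is the Claim_ definition above) =====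
theorem split_files_into_groups_spec : Claim_equal_split_files_into_groups := by
  intro l k _
  unfold Spec_split_files_into_groups split_files_into_groups split_files_into_groups_alt
  by_cases hk : k ≤ 0
  · simp [hk]
  · rw [if_neg hk, if_neg hk]
    by_cases hl : l = []
    · subst hl; simp
    · have hn1 : 1 ≤ l.length := by
        rcases Nat.eq_zero_or_pos l.length with h0 | h
        · exact absurd (List.length_eq_zero_iff.mp h0) hl
        · exact h
      have h0 : ¬ ((l.length : Int) = 0) := by omega
      rw [if_neg h0, if_neg h0]
      obtain ⟨kN, hkN⟩ : ∃ kN, kN = min k.toNat l.length := ⟨_, rfl⟩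
      have hkN1 : 1 ≤ kN := by omega
      have hkNn : kN ≤ l.length := by omega
      obtain ⟨base, hbase⟩ : ∃ b, b = l.length / kN := ⟨_, rfl⟩
      obtain ⟨rem, hremE⟩ : ∃ r, r = l.length % kN := ⟨_, rfl⟩
      have hb1 : 1 ≤ base := by rw [hbase]; exact (Nat.one_le_div_iff (by omega)).mpr hkNn
      have hr : rem < kN := by rw [hremE]; exact Nat.mod_lt _ (by omega)
      have hnn : l.length = base * kN + rem := by
        rw [hbase, hremE]
        have h5 := Nat.div_add_mod l.length kN
        have h6 : l.length / kN * kN = kN * (l.length / kN) := Nat.mul_comm _ _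
        omega
      have hkmin : min k ((l.length : Int)) = ((kN : Nat) : Int) := by
        rw [hkN]; push_cast [Nat.cast_min]; omega
      have hdivB : PySem.Int.floordiv ((l.length : Int)) (((kN : Nat) : Int)) = ((base : Nat) : Int) := by
        rw [hbase]; exact_mod_cast PySem.Int.floordiv_natCast l.length kN
      have hmodB : PySem.Int.mod ((l.length : Int)) (((kN : Nat) : Int)) = ((rem : Nat) : Int) := by
        rw [hremE]; exact_mod_cast PySem.Int.mod_natCast l.length kN
      -- B = pvChop of the size list
      have hB : pvBLoopB ((base : Nat) : Int) ((rem : Nat) : Int) l 0 [] [] 0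
          = pvChop ((List.range kN).map (pvSzf base rem)) l := by
        have h := pvBLoopB_chunks l base rem kN hb1 hr hnn l.length 0 0 [] [] (by omega)
          (by omega) (by simp [pvBN]) (by simp [pvBN])
        simp only [List.drop_zero, Nat.cast_zero] at h
        rw [h]
        have hb1e : pvBN base rem 1 = pvSzf base rem 0 := by
          simp only [pvBN, pvSzf]; split_ifs <;> omega
        have hrange : List.range kN = 0 :: List.range' 1 (kN - 1) := by
          rw [List.range_eq_range']
          obtain ⟨t, ht⟩ : ∃ t, kN = t + 1 := ⟨kN - 1, by omega⟩
          rw [ht, List.range'_succ]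
          simp
        rw [hrange]
        simp only [List.map_cons, pvChop, hb1e]
        simp
      rw [hkmin, hdivB, hmodB, hB]
      -- A = the same chop, in both of A's branches
      by_cases hge : k ≥ (l.length : Int)
      · rw [if_pos hge]
        have hkNe : kN = l.length := by omega
        have hbe : base = 1 := by
          rw [hbase, hkNe, Nat.div_self (by omega)]
        have hre : rem = 0 := by
          rw [hremE, hkNe, Nat.mod_self]
        rw [hkNe, hbe, hre]
        have : (List.range l.length).map (pvSzf 1 0) = List.replicate l.length 1 := by
          refine List.eq_replicate_iff.mpr ⟨by simp, ?_⟩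
          intro x hx
          simp only [List.mem_map] at hx
          obtain ⟨i, _, rfl⟩ := hx
          simp [pvSzf]
        rw [this, pvChop_ones]
      · rw [if_neg hge]
        have hkNe : kN = k.toNat := by omega
        have hkc : k = (kN : Int) := by omega
        have hdivA : PySem.Int.floordiv ((l.length : Int)) k = ((base : Nat) : Int) := by
          rw [hkc]; exact hdivB
        have hmodA : PySem.Int.mod ((l.length : Int)) k = ((rem : Nat) : Int) := by
          rw [hkc]; exact hmodB
        have hrange : PySem.List.pyRange 0 k 1 = PySem.List.pyRange 0 ((0:Int) + (kN : Int)) 1 := by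
          congr 1; omega
        have hF := pvFoldA l base ((rem : Nat) : Int) kN 0 0 []
        simp only [Nat.cast_zero] at hF
        simp only [hdivA, hmodA, hrange]
        rw [hF]
        simp only [List.nil_append, List.drop_zero]
        congr 1
        apply List.map_congr_left
        intro i _
        simp only [pvSzf]
        congr 1
        by_cases h : i < rem
        · rw [if_pos h, if_pos (by exact_mod_cast (show ((0 + i : Nat) : Int) < ((rem : Nat) : Int) by push_cast; omega))]
        · rw [if_neg h, if_neg (by push_cast; omega)]
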